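-- pv_equiv track=rewrite | github.com/orgus33/python_program | bitcoin.py | chaine_vers_liste
-- ===== SOURCE A (Python) =====
-- def chaine_vers_liste(chaine):
--     liste = []
--     for character in chaine:
--         liste.append(ord(character) % 100)
--
--     if len(liste) % 6 != 0:
--         while len(liste) % 6 != 0:
--             liste.insert(0, 0)
--
--     return liste
-- ===== SOURCE B (Python) =====
-- def chaine_vers_liste(chaine):
--     n = len(chaine)
--     total = ((n + 5) // 6) * 6
--     pad = total - n
--     return [0 if i < pad else ord(chaine[i - pad]) % 100 for i in range(total)]
-- ===== Notes on version B (the rewrite author's own statement) =====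
-- stated objective: alternative
-- what changed: B constructs the output by index in one comprehension: it computes the padded total length by ceiling division and fills each position directly (0 in the pad region, ord(chaine[i-pad])%100 otherwise), instead of A's append pass followed by a while-loop of insert(0,0) front-insertions.
import Mathlib
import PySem

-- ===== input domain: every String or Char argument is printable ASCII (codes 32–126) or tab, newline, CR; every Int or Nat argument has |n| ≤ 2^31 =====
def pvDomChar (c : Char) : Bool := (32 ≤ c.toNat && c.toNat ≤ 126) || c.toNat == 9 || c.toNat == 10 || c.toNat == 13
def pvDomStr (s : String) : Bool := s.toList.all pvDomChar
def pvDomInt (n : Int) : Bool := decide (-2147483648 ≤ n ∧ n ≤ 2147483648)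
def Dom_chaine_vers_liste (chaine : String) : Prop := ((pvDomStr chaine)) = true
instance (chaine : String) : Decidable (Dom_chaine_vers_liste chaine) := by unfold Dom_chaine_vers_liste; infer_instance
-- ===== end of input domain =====

-- B builds the output by index: it computes the padded total length in closed form and
-- produces each position directly (0 in the pad region, ord%100 of the shifted character
-- otherwise), instead of A's append loop followed by front-inserting zeros (objective: alternative).

-- ===== PORT A =====
-- the `while len(liste) % 6 != 0: liste.insert(0, 0)` loop
def pvPadLoopA (l : List Int) : List Int :=
  if l.length % 6 ≠ 0 then pvPadLoopA (0 :: l) else l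
termination_by (6 - l.length % 6) % 6
decreasing_by simp only [List.length_cons]; omega

def chaine_vers_liste (chaine : String) : List Int :=
  let liste := chaine.toList.foldl (fun acc c => acc ++ [(Int.ofNat c.toNat) % 100]) []
  if liste.length % 6 ≠ 0 then pvPadLoopA liste else liste

-- ===== PORT B =====
-- chaine[i - pad] is always in range here (pad ≤ i < total = pad + len), so pyGetD is exact.
def chaine_vers_liste_alt (chaine : String) : List Int :=
  let n : Int := PySem.Str.len chaine
  let total : Int := (PySem.Int.floordiv (n + 5) 6) * 6
  let pad : Int := total - n
  (PySem.List.pyRange 0 total 1).map (fun i =>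
    if i < pad then (0 : Int)
    else (Int.ofNat (PySem.List.pyGetD chaine.toList (i - pad) ' ').toNat) % 100)

-- ===== PRECONDITION & SPEC =====
def Spec_chaine_vers_liste (chaine : String) (out : List Int) : Prop := out = chaine_vers_liste_alt chaine
instance (chaine : String) (out : List Int) : Decidable (Spec_chaine_vers_liste chaine out) := by unfold Spec_chaine_vers_liste; infer_instance

-- ===== CLAIM (what is proved, stated in full; the proofs are below) =====
def Claim_equal_chaine_vers_liste : Prop := ∀ (chaine : String), Dom_chaine_vers_liste chaine → Spec_chaine_vers_liste chaine (chaine_vers_liste chaine)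

-- ===== LEMMAS AND PROOFS =====

theorem pvFoldlAppendMap (f : Char → Int) (xs : List Char) (acc : List Int) :
    xs.foldl (fun a c => a ++ [f c]) acc = acc ++ xs.map f := by
  induction xs generalizing acc with
  | nil => simp
  | cons c cs ih => simp [List.foldl, ih]

theorem pvPadLoopA_eq (l : List Int) :
    pvPadLoopA l = List.replicate ((6 - l.length % 6) % 6) 0 ++ l := by
  induction l using pvPadLoopA.induct with
  | case1 l h ih =>
      rw [pvPadLoopA, if_pos h, ih]
      have hlen : (6 - (0 :: l).length % 6) % 6 + 1 = (6 - l.length % 6) % 6 := by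
        simp only [List.length_cons]; omega
      rw [← hlen, List.replicate_succ']
      simp
  | case2 l h =>
      rw [pvPadLoopA, if_neg h]
      have : l.length % 6 = 0 := by omega
      simp [this]

theorem pvMapGetDRange (f : Char → Int) (d : Char) (l : List Char) :
    (List.range l.length).map (fun j => f (l.getD j d)) = l.map f := by
  induction l with
  | nil => simp
  | cons c cs ih =>
      simp only [List.length_cons, List.range_succ_eq_map, List.map_cons, List.map_map]
      simp only [Function.comp_def, List.getD_cons_zero, List.getD_cons_succ]
      rw [ih]

-- ===== VERDICT (by name: the statement is the Claim_ definition above) =====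
theorem chaine_vers_liste_spec : Claim_equal_chaine_vers_liste := by
  intro chaine _
  unfold Spec_chaine_vers_liste chaine_vers_liste chaine_vers_liste_alt
  simp only [pvFoldlAppendMap, List.nil_append]
  set cs := chaine.toList with hcs
  set f : Char → Int := fun c => (Int.ofNat c.toNat) % 100 with hf
  set L : Nat := cs.length with hL
  have hlen : PySem.Str.len chaine = (L : Int) := by
    simp [PySem.Str.len_eq, hL, hcs]
  have hfd : PySem.Int.floordiv ((L : Int) + 5) 6 = ((L + 5) / 6 : Nat) := by
    rw [PySem.Int.floordiv_eq_ediv_of_pos (by omega)]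
    push_cast
    omega
  set P : Nat := (6 - L % 6) % 6 with hP
  have htotal : (PySem.Int.floordiv ((L : Int) + 5) 6) * 6 = ((P + L : Nat) : Int) := by
    rw [hfd]; push_cast; omega
  rw [hlen, htotal]
  have hpad : ((P + L : Nat) : Int) - (L : Int) = (P : Int) := by push_cast; omega
  rw [hpad, PySem.List.pyRange_zero_natCast, List.range_add, List.map_append, List.map_append, List.map_map, List.map_map]
  have hA : (if (cs.map f).length % 6 ≠ 0 then pvPadLoopA (cs.map f) else cs.map f)
      = List.replicate P 0 ++ cs.map f := by
    by_cases h : (cs.map f).length % 6 ≠ 0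
    · rw [if_pos h, pvPadLoopA_eq]
      have : (6 - (cs.map f).length % 6) % 6 = P := by
        simp only [List.length_map, ← hL]; rw [hP]
      rw [this]
    · rw [if_neg h]
      have hz : P = 0 := by simp only [List.length_map, ← hL] at h; omega
      rw [hz]; simp
  rw [hA]
  have h1 : (List.range P).map ((fun i => if i < ((P:Nat):Int) then (0 : Int)
      else (Int.ofNat (PySem.List.pyGetD cs (i - ((P:Nat):Int)) ' ').toNat) % 100) ∘ (fun k : Nat => ((k:Nat):Int)))
      = List.replicate P 0 := by
    rw [List.eq_replicate_iff]
    refine ⟨by simp, ?_⟩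
    intro b hb
    simp only [List.mem_map, List.mem_range, Function.comp_def] at hb
    obtain ⟨k, hk, hbk⟩ := hb
    rw [if_pos (by exact_mod_cast hk)] at hbk
    omega
  have h2 : (List.range L).map ((fun i => if i < ((P:Nat):Int) then (0 : Int)
      else (Int.ofNat (PySem.List.pyGetD cs (i - ((P:Nat):Int)) ' ').toNat) % 100) ∘ ((fun k : Nat => ((k:Nat):Int)) ∘ (fun x => P + x)))
      = cs.map f := by
    rw [← pvMapGetDRange f ' ' cs, ← hL]
    apply List.map_congr_left
    intro j hj
    simp only [List.mem_range] at hj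
    simp only [Function.comp_def]
    rw [if_neg (by push_cast; omega)]
    have hidx : ((P + j : Nat) : Int) - ((P:Nat) : Int) = ((j : Nat) : Int) := by push_cast; omega
    rw [hidx, PySem.List.pyGetD_natCast]
  rw [h1, List.map_map, Function.comp_assoc, h2]
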